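-- pv_equiv track=rewrite | github.com/BerniKiss/Formalis | L1/A1.py | csoportosit_atmenetek
-- ===== SOURCE A (Python) =====
-- def csoportosit_atmenetek(atmenet_lista):
--     csoport = {}
--
--     for atmenet in atmenet_lista:
--         honnan = atmenet[0]
--         szimbolum = atmenet[1]
--         hova = atmenet[2]
--
--         par = (honnan, hova)
--
--         if par in csoport:
--             csoport[par] = csoport[par] + ', ' + szimbolum
--         else:
--             csoport[par] = szimbolum
--
--     return csoport
-- ===== SOURCE B (Python) =====
-- def csoportosit_atmenetek(atmenet_lista):
--     parok = []
--     for atmenet in atmenet_lista: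
--         par = (atmenet[0], atmenet[2])
--         if par not in parok:
--             parok.append(par)
--     return {par: ', '.join(a[1] for a in atmenet_lista if (a[0], a[2]) == par)
--             for par in parok}
-- ===== Notes on version B (the rewrite author's own statement) =====
-- stated objective: alternative
-- what changed: B builds no dict while scanning: a first pass collects the distinct (from,to) pairs in first-seen order into a list, and a second pass per pair filters the whole input for that pair's symbols and joins them with ', ', instead of A's single pass that accumulates growing strings in a dict.
import Mathlib
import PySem

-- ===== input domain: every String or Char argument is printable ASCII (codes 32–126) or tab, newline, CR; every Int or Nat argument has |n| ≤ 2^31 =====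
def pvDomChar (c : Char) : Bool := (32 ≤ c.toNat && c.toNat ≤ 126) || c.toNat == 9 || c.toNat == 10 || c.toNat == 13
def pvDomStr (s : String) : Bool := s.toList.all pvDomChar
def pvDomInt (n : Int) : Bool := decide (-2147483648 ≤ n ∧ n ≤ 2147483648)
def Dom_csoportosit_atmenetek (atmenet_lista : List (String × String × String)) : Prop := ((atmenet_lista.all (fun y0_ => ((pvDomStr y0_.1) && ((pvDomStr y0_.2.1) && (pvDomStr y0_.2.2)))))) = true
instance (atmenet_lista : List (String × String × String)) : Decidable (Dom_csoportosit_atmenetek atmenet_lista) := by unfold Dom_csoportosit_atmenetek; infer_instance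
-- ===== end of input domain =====

-- B builds no dict: it first collects the distinct (from,to) pairs in first-seen order, then
-- for each pair filters the whole input for that pair's symbols and joins them with ', ';
-- objective: alternative decomposition (staged scans instead of A's single dict-accumulating pass).

-- ===== PORT A =====
-- A's loop body: check membership, then either extend the stored string or store the symbol.
def pvStepA (csoport : PySem.Dict (String × String) String) (atmenet : String × String × String) :
    PySem.Dict (String × String) String :=
  let par := (atmenet.1, atmenet.2.2)
  if csoport.contains par then
    csoport.insert par (csoport.getD par "" ++ ", " ++ atmenet.2.1)
  else
    csoport.insert par atmenet.2.1

def csoportosit_atmenetek (atmenet_lista : List (String × String × String)) : List (String × String × String) :=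
  ((atmenet_lista.foldl pvStepA PySem.Dict.empty).items).map (fun p => (p.1.1, p.1.2, p.2))

-- ===== PORT B =====
-- the (from, to) pair of a transition
def pvPar (t : String × String × String) : String × String := (t.1, t.2.2)

-- B's first pass: the distinct pairs in first-seen order (list membership test, as in Source B)
def pvParok (l : List (String × String × String)) : List (String × String) :=
  l.foldl (fun acc t => if pvPar t ∈ acc then acc else acc ++ [pvPar t]) []

-- the generator "a[1] for a in atmenet_lista if (a[0], a[2]) == par"
def pvSzimbolumok (l : List (String × String × String)) (par : String × String) : List String :=
  l.filterMap (fun t => if pvPar t == par then some t.2.1 else none)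

def csoportosit_atmenetek_alt (atmenet_lista : List (String × String × String)) : List (String × String × String) :=
  (pvParok atmenet_lista).map
    (fun par => (par.1, par.2, PySem.Str.join ", " (pvSzimbolumok atmenet_lista par)))

-- ===== PRECONDITION & SPEC =====
def Spec_csoportosit_atmenetek (atmenet_lista : List (String × String × String)) (out : List (String × String × String)) : Prop := out = csoportosit_atmenetek_alt atmenet_lista
instance (atmenet_lista : List (String × String × String)) (out : List (String × String × String)) : Decidable (Spec_csoportosit_atmenetek atmenet_lista out) := by unfold Spec_csoportosit_atmenetek; infer_instance

-- ===== CLAIM =====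
def Claim_equal_csoportosit_atmenetek : Prop := ∀ (atmenet_lista : List (String × String × String)), Dom_csoportosit_atmenetek atmenet_lista → Spec_csoportosit_atmenetek atmenet_lista (csoportosit_atmenetek atmenet_lista)

-- ===== LEMMAS AND PROOFS =====

theorem pv_join_singleton (s : String) : PySem.Str.join ", " [s] = s := by
  apply String.toList_inj.mp
  rw [PySem.Str.toList_join]
  simp [PySem.Chars.join_singleton]

theorem pv_join_append_singleton (syms : List String) (s : String) (h : syms ≠ []) :
    PySem.Str.join ", " (syms ++ [s]) = PySem.Str.join ", " syms ++ ", " ++ s := by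
  induction syms with
  | nil => exact absurd rfl h
  | cons a rest ih =>
    cases rest with
    | nil =>
      apply String.toList_inj.mp
      simp [PySem.Str.toList_join, PySem.Chars.join_cons_cons, PySem.Chars.join_singleton]
    | cons b rest' =>
      apply String.toList_inj.mp
      have hih := congrArg String.toList (ih (by simp))
      simp only [PySem.Str.toList_join, String.toList_append, List.map_cons, List.map_append,
        List.cons_append] at hih ⊢
      rw [PySem.Chars.join_cons_cons, PySem.Chars.join_cons_cons, hih]
      simp

-- proof-only intermediate: a dict grouping symbols into lists, linking A's dict to B's scans
def pvStepB (csoport : PySem.Dict (String × String) (List String)) (atmenet : String × String × String) :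
    PySem.Dict (String × String) (List String) :=
  csoport.modify (atmenet.1, atmenet.2.2) [] (· ++ [atmenet.2.1])

/-- The invariant tying A's string dict to the list dict during the fold. -/
def pvInv (d1 : PySem.Dict (String × String) String)
    (d2 : PySem.Dict (String × String) (List String)) : Prop :=
  d2.keys.Nodup ∧ (∀ p ∈ d2.items, p.2 ≠ []) ∧
    d1.items = d2.items.map (fun p => (p.1, PySem.Str.join ", " p.2))

theorem pv_keys_eq {d1 : PySem.Dict (String × String) String}
    {d2 : PySem.Dict (String × String) (List String)}
    (h : d1.items = d2.items.map (fun p => (p.1, PySem.Str.join ", " p.2))) :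
    d1.keys = d2.keys := by
  show d1.items.map (·.1) = d2.items.map (·.1)
  rw [h, List.map_map]
  rfl

theorem pv_contains_eq {d1 : PySem.Dict (String × String) String}
    {d2 : PySem.Dict (String × String) (List String)}
    (h : d1.items = d2.items.map (fun p => (p.1, PySem.Str.join ", " p.2)))
    (k : String × String) : d1.contains k = d2.contains k := by
  rw [PySem.Dict.contains_eq_decide_mem_keys, PySem.Dict.contains_eq_decide_mem_keys,
    pv_keys_eq h]

theorem pv_step (d1 : PySem.Dict (String × String) String)
    (d2 : PySem.Dict (String × String) (List String))
    (t : String × String × String) (h : pvInv d1 d2) :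
    pvInv (pvStepA d1 t) (pvStepB d2 t) := by
  obtain ⟨hnd, hne, hitems⟩ := h
  set par := (t.1, t.2.2) with hpar
  have hc := pv_contains_eq hitems par
  have hmod : pvStepB d2 t = d2.insert par (d2.getD par [] ++ [t.2.1]) := rfl
  by_cases hin : d2.contains par = true
  · -- key already present
    have hsome : (d2.get? par).isSome := by
      rw [← PySem.Dict.contains_eq_isSome_get?, hin]
    obtain ⟨v, hv⟩ := Option.isSome_iff_exists.mp hsome
    have hvmem : (par, v) ∈ d2.items := PySem.Dict.mem_items_of_get?_eq_some d2 hv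
    have hvne : v ≠ [] := hne _ hvmem
    have hgd2 : d2.getD par [] = v := PySem.Dict.getD_of_mem_items d2 hvmem hnd []
    have hd1mem : (par, PySem.Str.join ", " v) ∈ d1.items := by
      rw [hitems]
      exact List.mem_map.mpr ⟨(par, v), hvmem, rfl⟩
    have hnd1 : d1.keys.Nodup := by rw [pv_keys_eq hitems]; exact hnd
    have hgd1 : d1.getD par "" = PySem.Str.join ", " v :=
      PySem.Dict.getD_of_mem_items d1 hd1mem hnd1 ""
    have hA : pvStepA d1 t = d1.insert par (PySem.Str.join ", " v ++ ", " ++ t.2.1) := by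
      simp [pvStepA, ← hpar, hc, hin, hgd1]
    refine ⟨?_, ?_, ?_⟩
    · rw [hmod]; exact PySem.Dict.nodup_keys_insert d2 par _ hnd
    · intro p hp
      rw [hmod, PySem.Dict.items_insert_of_contains d2 _ hin] at hp
      rcases List.mem_map.mp hp with ⟨q, hq, hqe⟩
      by_cases hqp : (q.1 == par) = true
      · simp only [hqp, if_true] at hqe
        rw [← hqe]; simp [hgd2]
      · simp only [hqp] at hqe
        rw [← hqe]; exact hne q hq
    · rw [hA, hmod, PySem.Dict.items_insert_of_contains d1 _ (by rw [hc]; exact hin),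
        PySem.Dict.items_insert_of_contains d2 _ hin, hitems, List.map_map, List.map_map]
      apply List.map_congr_left
      intro q hq
      by_cases hqp : (q.1 == par) = true
      · simp [Function.comp, hqp, hgd2, pv_join_append_singleton v t.2.1 hvne]
      · simp [Function.comp, hqp]
  · -- fresh key
    have hin' : d2.contains par = false := by simpa using hin
    have hA : pvStepA d1 t = d1.insert par t.2.1 := by
      simp [pvStepA, ← hpar, hc, hin']
    have hB : pvStepB d2 t = d2.insert par [t.2.1] := by
      rw [hmod, PySem.Dict.getD_of_not_contains d2 [] hin']; rfl
    refine ⟨?_, ?_, ?_⟩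
    · rw [hB]; exact PySem.Dict.nodup_keys_insert d2 par _ hnd
    · intro p hp
      rw [hB, PySem.Dict.items_insert_of_not_contains d2 _ hin'] at hp
      rcases List.mem_append.mp hp with hp | hp
      · exact hne p hp
      · simp only [List.mem_singleton] at hp; rw [hp]; simp
    · rw [hA, hB, PySem.Dict.items_insert_of_not_contains d1 _ (by rw [hc]; exact hin'),
        PySem.Dict.items_insert_of_not_contains d2 _ hin', hitems]
      simp [pv_join_singleton]

theorem pv_fold (l : List (String × String × String))
    (d1 : PySem.Dict (String × String) String)
    (d2 : PySem.Dict (String × String) (List String)) (h : pvInv d1 d2) :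
    pvInv (l.foldl pvStepA d1) (l.foldl pvStepB d2) := by
  induction l generalizing d1 d2 with
  | nil => exact h
  | cons t rest ih => exact ih _ _ (pv_step d1 d2 t h)

-- pvParok step when one element is appended to the input
theorem pv_parok_append (l : List (String × String × String)) (t : String × String × String) :
    pvParok (l ++ [t]) = if pvPar t ∈ pvParok l then pvParok l else pvParok l ++ [pvPar t] := by
  simp [pvParok, List.foldl_append]

theorem pv_mem_parok (l : List (String × String × String)) (k : String × String) :
    k ∈ pvParok l ↔ ∃ t ∈ l, pvPar t = k := by
  induction l using List.reverseRecOn with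
  | nil => simp [pvParok]
  | append_singleton l t ih =>
    rw [pv_parok_append]
    by_cases h : pvPar t ∈ pvParok l
    · rw [if_pos h, ih]
      constructor
      · rintro ⟨u, hu, he⟩; exact ⟨u, List.mem_append_left _ hu, he⟩
      · rintro ⟨u, hu, he⟩
        cases List.mem_append.mp hu with
        | inl hu => exact ⟨u, hu, he⟩
        | inr hu =>
          have hut : u = t := by simpa using hu
          subst hut; subst he; exact ih.mp h
    · rw [if_neg h]
      constructor
      · intro hm
        cases List.mem_append.mp hm with
        | inl hm =>
          obtain ⟨u, hu, he⟩ := ih.mp hm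
          exact ⟨u, List.mem_append_left _ hu, he⟩
        | inr hm =>
          have hk : k = pvPar t := by simpa using hm
          exact ⟨t, List.mem_append_right _ (by simp), hk.symm⟩
      · rintro ⟨u, hu, he⟩
        cases List.mem_append.mp hu with
        | inl hu => exact List.mem_append_left _ (ih.mpr ⟨u, hu, he⟩)
        | inr hu =>
          have hut : u = t := by simpa using hu
          subst hut; exact List.mem_append_right _ (by simp [he])

theorem pv_nodup_parok (l : List (String × String × String)) : (pvParok l).Nodup := by
  induction l using List.reverseRecOn with
  | nil => simp [pvParok]
  | append_singleton l t ih =>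
    rw [pv_parok_append]
    by_cases h : pvPar t ∈ pvParok l
    · rwa [if_pos h]
    · rw [if_neg h, List.nodup_append]
      refine ⟨ih, by simp, fun a hal b hbt => ?_⟩
      have hb : b = pvPar t := by simpa using hbt
      exact fun he => h (hb ▸ he ▸ hal)

theorem pv_szimb_append (l : List (String × String × String)) (t : String × String × String)
    (k : String × String) :
    pvSzimbolumok (l ++ [t]) k =
      pvSzimbolumok l k ++ (if pvPar t == k then [t.2.1] else []) := by
  by_cases h : (pvPar t == k) = true
  · have h' : pvPar t = k := by simpa using h
    simp [pvSzimbolumok, List.filterMap_append, h']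
  · have h' : ¬ pvPar t = k := by simpa using h
    simp [pvSzimbolumok, List.filterMap_append, h, h']

theorem pv_szimb_nil_of_not_mem (l : List (String × String × String)) (k : String × String)
    (h : k ∉ pvParok l) : pvSzimbolumok l k = [] := by
  rw [pvSzimbolumok, List.filterMap_eq_nil_iff]
  intro t ht
  have : pvPar t ≠ k := fun he => h ((pv_mem_parok l k).mpr ⟨t, ht, he⟩)
  simp [this]

/-- The list-dict built by the fold is exactly B's pairs-then-filter description. -/
theorem pv_dict_items (l : List (String × String × String)) :
    (l.foldl pvStepB PySem.Dict.empty).items =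
      (pvParok l).map (fun k => (k, pvSzimbolumok l k)) := by
  induction l using List.reverseRecOn with
  | nil => rfl
  | append_singleton l t ih =>
    rw [List.foldl_append]
    simp only [List.foldl_cons, List.foldl_nil]
    set D := l.foldl pvStepB PySem.Dict.empty with hD
    set k := pvPar t with hk
    have hkeys : D.keys = pvParok l := by
      show D.items.map (·.1) = pvParok l
      rw [ih, List.map_map]; exact List.map_id _
    have hnd : D.keys.Nodup := by rw [hkeys]; exact pv_nodup_parok l
    have hmod : pvStepB D t = D.insert k (D.getD k [] ++ [t.2.1]) := rfl
    by_cases hin : k ∈ pvParok l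
    · have hcon : D.contains k = true := by
        rw [PySem.Dict.contains_eq_decide_mem_keys, hkeys]; simpa using hin
      have hmem : (k, pvSzimbolumok l k) ∈ D.items := by
        rw [ih]; exact List.mem_map.mpr ⟨k, hin, rfl⟩
      have hgd : D.getD k [] = pvSzimbolumok l k :=
        PySem.Dict.getD_of_mem_items D hmem hnd []
      rw [hmod, PySem.Dict.items_insert_of_contains D _ hcon, ih, List.map_map,
        pv_parok_append, ← hk, if_pos hin]
      apply List.map_congr_left
      intro q hq
      by_cases hqk : (q == k) = true
      · have hqk' : q = k := by simpa using hqk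
        subst hqk'
        simp [Function.comp, hgd, pv_szimb_append, ← hk]
      · have hqk' : ¬ q = k := by simpa using hqk
        have hne : ¬ pvPar t = q := by rw [← hk]; exact fun e => hqk' e.symm
        simp [Function.comp, hqk, pv_szimb_append, hne]
    · have hcon : D.contains k = false := by
        rw [PySem.Dict.contains_eq_decide_mem_keys, hkeys]; simpa using hin
      have hgd : D.getD k [] = [] := PySem.Dict.getD_of_not_contains D [] hcon
      rw [hmod, hgd, PySem.Dict.items_insert_of_not_contains D _ hcon, ih,
        pv_parok_append, ← hk, if_neg hin, List.map_append]
      congr 1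
      · apply List.map_congr_left
        intro q hq
        have hqk : ¬ pvPar t = q := by rw [← hk]; exact fun he => hin (he ▸ hq)
        simp [pv_szimb_append, hqk]
      · simp [pv_szimb_append, pv_szimb_nil_of_not_mem l k hin, ← hk]

-- ===== VERDICT =====
theorem csoportosit_atmenetek_spec : Claim_equal_csoportosit_atmenetek := by
  intro l _
  unfold Spec_csoportosit_atmenetek csoportosit_atmenetek csoportosit_atmenetek_alt
  have h := pv_fold l PySem.Dict.empty PySem.Dict.empty
    ⟨by simp, by simp [PySem.Dict.empty], by simp [PySem.Dict.empty]⟩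
  rw [h.2.2, pv_dict_items, List.map_map, List.map_map]
  rfl
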